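-- pv_equiv track=rewrite | github.com/vrautela/De-Bruijn-Graph-Construction | divide_and_conqer_db_graph_construction.py | constructDBGraph
-- ===== SOURCE A (Python) =====
-- from typing import List, Dict, Tuple
-- from collections import Counter, deque
--
-- def combine_graphs(e_1: Dict[Tuple[str, str], int], e_2: Dict[Tuple[str, str], int]) -> Dict[Tuple[str, str], int]:
--     for key in e_1:
--         if key in e_2:
--             e_2[key] += e_1[key]
--         else:
--             e_2[key] = e_1[key]
--     return e_2
--
-- def constructDBGraph(s: List[List[str]], k: int) -> Dict[Tuple[str, str], int]:
--     if len(s) == 1: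
--         return constructGraphFromPath(s[0], k)
--     else:
--         mid = len(s) // 2
--         e_1 = constructDBGraph(s[:mid], k)
--         e_2 = constructDBGraph(s[mid:], k)
--
--         return combine_graphs(e_1, e_2)
--
-- def constructGraphFromPath(p: List[str], k: int) -> Dict[Tuple[str, str], int]:
--     e = dict()
--     path_length = len(p)
--     if path_length < k:
--         return e
--     else:
--         curr_node = deque()
--         i = 0
--         while i < k:
--             curr_node.append(p[i])
--             i += 1
--
--         while i < path_length:
--             prev_node_str = ';'.join(curr_node)
--             curr_node.popleft()
--             curr_node.append(p[i])
--             curr_node_str = ';'.join(curr_node)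
--             edge = (prev_node_str, curr_node_str)
--             # Do we need to have a hash of the edge, or can the key be the edge itself?
--             # edge_hash = hash(edge)
--             # if edge_hash in e:
--             #     e[edge_hash] += 1
--             # else:
--             #     e[edge_hash] = 1
--             if edge in e:
--                 e[edge] += 1
--             else:
--                 e[edge] = 1
--             i += 1
--     return e
-- ===== SOURCE B (Python) =====
-- from typing import List, Dict, Tuple
--
-- def constructDBGraph(s: List[List[str]], k: int) -> Dict[Tuple[str, str], int]:
--     # One streaming pass, one global dict; scanning paths in reverse reproduces
--     # the insertion order of the recursive merge.
--     e = {}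
--     for p in reversed(s):
--         if len(p) < k:
--             continue
--         nodes = [';'.join(p[i:i + k]) for i in range(len(p) - k + 1)]
--         for edge in zip(nodes, nodes[1:]):
--             e[edge] = e.get(edge, 0) + 1
--     return e
-- ===== Notes on version B (the rewrite author's own statement) =====
-- stated objective: alternative
-- what changed: Replaces the divide-and-conquer recursion with repeated dict merging by a single streaming pass that counts all k-mer transitions into one global dict (scanning paths in reverse, which reproduces A's merge insertion order).
-- outside the precondition, e.g. on constructDBGraph([], 1): A raises RecursionError, B returns {}; on constructDBGraph([[], []], -1): A returns {}, B returns {('', ''): 2}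
import Mathlib
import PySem

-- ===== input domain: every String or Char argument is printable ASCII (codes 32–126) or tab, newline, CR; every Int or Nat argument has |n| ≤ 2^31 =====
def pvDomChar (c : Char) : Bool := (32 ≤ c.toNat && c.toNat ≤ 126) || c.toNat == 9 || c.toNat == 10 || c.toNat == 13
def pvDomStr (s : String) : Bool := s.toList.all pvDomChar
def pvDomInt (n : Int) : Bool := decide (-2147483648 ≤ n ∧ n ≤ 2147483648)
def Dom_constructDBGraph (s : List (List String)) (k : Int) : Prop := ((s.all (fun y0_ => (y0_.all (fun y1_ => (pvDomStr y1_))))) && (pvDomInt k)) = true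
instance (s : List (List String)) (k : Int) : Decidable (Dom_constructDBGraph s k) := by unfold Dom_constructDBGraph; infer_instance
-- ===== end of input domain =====

-- B replaces the divide-and-conquer merge by one streaming counting pass (scanning paths in
-- reverse, which is exactly the insertion order A's recursive merge produces).

-- ===== PORT A =====
-- constructGraphFromPath: deque window of k strings slides along the path, counting edges.
def pvPathGraph (p : List String) (k : Int) : PySem.Dict (String × String) Int :=
  if (p.length : Int) < k then PySem.Dict.empty
  else
    -- while i < k: curr_node.append(p[i])
    let curr0 : List String :=
      (PySem.List.pyRange 0 k 1).foldl (fun c i => c ++ [PySem.List.pyGetD p i ""]) []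
    -- while i < path_length: slide the window, count the edge
    let st :=
      (PySem.List.pyRange k (p.length : Int) 1).foldl
        (fun (st : PySem.Dict (String × String) Int × List String) i =>
          let prevStr := PySem.Str.join ";" st.2
          let c2 := st.2.tail ++ [PySem.List.pyGetD p i ""]     -- popleft(); append(p[i])
          let currStr := PySem.Str.join ";" c2
          let edge := (prevStr, currStr)
          let e :=
            match st.1.get? edge with
            | some v => st.1.insert edge (v + 1)
            | none => st.1.insert edge 1
          (e, c2))
        (PySem.Dict.empty, curr0)
    st.1

-- combine_graphs: merge e1 into e2 (e2 mutated in place and returned)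
def pvCombine (e1 e2 : PySem.Dict (String × String) Int) : PySem.Dict (String × String) Int :=
  e1.items.foldl
    (fun acc kv =>
      match acc.get? kv.1 with
      | some v => acc.insert kv.1 (v + kv.2)
      | none => acc.insert kv.1 kv.2)
    e2

theorem pv_slice_len1 (s : List (List String)) (_h1 : ¬ s.length = 1) (_h0 : ¬ s.length = 0) :
    (PySem.List.slice s (some (0:Int)) (some (PySem.Int.floordiv (s.length : Int) 2))).length < s.length := by
  rw [show (PySem.Int.floordiv (s.length : Int) 2) = ((s.length / 2 : Nat) : Int) from
      PySem.Int.floordiv_natCast s.length 2]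
  rw [show ((0:Int) = ((0:Nat):Int)) from rfl, PySem.List.slice_natCast]
  simp only [List.drop_zero, List.length_take]
  omega

theorem pv_slice_len2 (s : List (List String)) (_h1 : ¬ s.length = 1) (_h0 : ¬ s.length = 0) :
    (PySem.List.slice s (some (PySem.Int.floordiv (s.length : Int) 2)) (some (s.length : Int))).length < s.length := by
  rw [show (PySem.Int.floordiv (s.length : Int) 2) = ((s.length / 2 : Nat) : Int) from
      PySem.Int.floordiv_natCast s.length 2]
  rw [PySem.List.slice_natCast]
  simp only [List.length_take, List.length_drop]
  omega

def pvDBG (s : List (List String)) (k : Int) : PySem.Dict (String × String) Int :=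
  if _h1 : s.length = 1 then pvPathGraph (PySem.List.pyGetD s 0 []) k
  else if _h0 : s.length = 0 then PySem.Dict.empty
      -- Python recurses forever on s = []; this branch is outside Pre_ (totality guard only)
  else
    let mid := PySem.Int.floordiv (s.length : Int) 2
    pvCombine (pvDBG (PySem.List.slice s (some 0) (some mid)) k)
              (pvDBG (PySem.List.slice s (some mid) (some (s.length : Int))) k)
termination_by s.length
decreasing_by
  · exact pv_slice_len1 s _h1 _h0
  · exact pv_slice_len2 s _h1 _h0

def constructDBGraph (s : List (List String)) (k : Int) : List (String × String × Int) :=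
  (pvDBG s k).items.map (fun q => (q.1.1, q.1.2, q.2))

-- ===== PORT B =====
def pvAddPath (e : PySem.Dict (String × String) Int) (p : List String) (k : Int) :
    PySem.Dict (String × String) Int :=
  if (p.length : Int) < k then e
  else
    let nodes :=
      (PySem.List.pyRange 0 ((p.length : Int) - k + 1) 1).map
        (fun i => PySem.Str.join ";" (PySem.List.slice p (some i) (some (i + k))))
    (nodes.zip nodes.tail).foldl (fun e ab => e.insert ab (e.getD ab 0 + 1)) e

def constructDBGraph_alt (s : List (List String)) (k : Int) : List (String × String × Int) :=
  (s.reverse.foldl (fun e p => pvAddPath e p k) PySem.Dict.empty).items.map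
    (fun q => (q.1.1, q.1.2, q.2))

-- ===== PRECONDITION & SPEC =====
-- Pre_ excludes s = [] (A recurses forever, RecursionError) and k ≤ 0, on which A raises
-- IndexError (popleft from an empty deque) as soon as some path is nonempty; k ≥ 1 is the
-- natural domain of a k-mer size.  (For k ≤ 0 with all paths empty A happens to return {}.)
def Pre_constructDBGraph (s : List (List String)) (k : Int) : Prop := s ≠ [] ∧ 1 ≤ k
instance (s : List (List String)) (k : Int) : Decidable (Pre_constructDBGraph s k) := by
  unfold Pre_constructDBGraph; infer_instance

def pvWitness_constructDBGraph : List (List String) × Int := ([["a", "b", "a", "b"], ["b", "a"]], 2)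

def Spec_constructDBGraph (s : List (List String)) (k : Int) (out : List (String × String × Int)) : Prop := out = constructDBGraph_alt s k
instance (s : List (List String)) (k : Int) (out : List (String × String × Int)) : Decidable (Spec_constructDBGraph s k out) := by unfold Spec_constructDBGraph; infer_instance

-- ===== CLAIM (what is proved, stated in full; the proofs are below) =====
def Claim_equal_constructDBGraph : Prop := ∀ (s : List (List String)) (k : Int), Dom_constructDBGraph s k → Pre_constructDBGraph s k → Spec_constructDBGraph s k (constructDBGraph s k)

-- ===== LEMMAS AND PROOFS =====

-- Common vocabulary for both sides: a window node, the edge list of one path, the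
-- counting step ("bump") and the generic add-v step ("addK").
def pvBump (d : PySem.Dict (String × String) Int) (x : String × String) :
    PySem.Dict (String × String) Int := d.insert x (d.getD x 0 + 1)

def pvAddK (d : PySem.Dict (String × String) Int) (x : String × String) (v : Int) :
    PySem.Dict (String × String) Int := d.insert x (d.getD x 0 + v)

def pvNode (p : List String) (kn j : Nat) : String :=
  PySem.Str.join ";" ((p.drop j).take kn)

def pvEdges (p : List String) (kn : Nat) : Nat → Nat → List (String × String)
  | _, 0 => []
  | j, c + 1 => (pvNode p kn j, pvNode p kn (j + 1)) :: pvEdges p kn (j + 1) c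

-- the per-path effect both ports share
def pvAddE (d : PySem.Dict (String × String) Int) (p : List String) (k : Int) :
    PySem.Dict (String × String) Int :=
  if (p.length : Int) < k then d
  else (pvEdges p k.toNat 0 (p.length - k.toNat)).foldl pvBump d

def pvFoldr (s : List (List String)) (k : Int) (e : PySem.Dict (String × String) Int) :
    PySem.Dict (String × String) Int :=
  s.foldr (fun p acc => pvAddE acc p k) e

theorem pv_window_slide (p : List String) (kn j : Nat) (h : j + kn < p.length) (hk : 0 < kn) :
    ((p.drop j).take kn).tail ++ [p.getD (j + kn) ""] = (p.drop (j + 1)).take kn := by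
  obtain ⟨m, rfl⟩ : ∃ m, kn = m + 1 := ⟨kn - 1, by omega⟩
  have hj : j < p.length := by omega
  rw [List.drop_eq_getElem_cons hj, List.take_succ_cons, List.tail_cons]
  have h2 : m < (p.drop (j+1)).length := by simp [List.length_drop]; omega
  have h3 : p.getD (j + (m+1)) "" = (p.drop (j+1))[m] := by
    rw [List.getElem_drop, List.getD_eq_getElem p "" (by omega)]
    congr 1; omega
  rw [h3, ← List.take_succ_eq_append_getElem h2]

theorem pv_stepA_eq_bump (d : PySem.Dict (String × String) Int) (x : String × String) :
    (match d.get? x with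
     | some v => d.insert x (v + 1)
     | none => d.insert x 1) = pvBump d x := by
  cases h : d.get? x <;> simp [pvBump, PySem.Dict.getD_eq_get?_getD, h]

theorem pv_loopA (p : List String) (kn : Nat) (hk : 0 < kn) :
    ∀ (c i : Nat), i + c = p.length → kn ≤ i →
      ∀ d : PySem.Dict (String × String) Int,
      (PySem.List.pyRange (i : Int) (p.length : Int) 1).foldl
        (fun (st : PySem.Dict (String × String) Int × List String) ii =>
          let prevStr := PySem.Str.join ";" st.2
          let c2 := st.2.tail ++ [PySem.List.pyGetD p ii ""]
          let currStr := PySem.Str.join ";" c2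
          let edge := (prevStr, currStr)
          let e :=
            match st.1.get? edge with
            | some v => st.1.insert edge (v + 1)
            | none => st.1.insert edge 1
          (e, c2))
        (d, (p.drop (i - kn)).take kn)
      = ((pvEdges p kn (i - kn) c).foldl pvBump d, (p.drop (i + c - kn)).take kn) := by
  intro c
  induction c with
  | zero =>
    intro i hi hki d
    rw [PySem.List.pyRange_one_eq_nil (by omega : (p.length : Int) ≤ (i : Int))]
    simp [pvEdges]
  | succ c ih =>
    intro i hi hki d
    have hilt : i < p.length := by omega
    rw [PySem.List.pyRange_one_cons (by exact_mod_cast hilt)]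
    rw [List.foldl_cons]
    simp only [PySem.List.pyGetD_natCast]
    have hslide : ((p.drop (i - kn)).take kn).tail ++ [p.getD i ""]
        = (p.drop (i - kn + 1)).take kn := by
      have := pv_window_slide p kn (i - kn) (by omega) hk
      rw [show i - kn + kn = i by omega] at this
      exact this
    have hcast : ((i : Int) + 1) = ((i + 1 : Nat) : Int) := by push_cast; ring
    rw [hslide, pv_stepA_eq_bump, hcast]
    have hih := ih (i + 1) (by omega) (by omega)
      (pvBump d (PySem.Str.join ";" ((p.drop (i - kn)).take kn),
                 PySem.Str.join ";" ((p.drop (i - kn + 1)).take kn)))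
    rw [show i + 1 - kn = i - kn + 1 by omega] at hih
    rw [hih, show i + (c + 1) - kn = i + 1 + c - kn by omega]
    rfl

theorem pv_curr0 (p : List String) (kn : Nat) (hlen : kn ≤ p.length) :
    (PySem.List.pyRange 0 (kn : Int) 1).foldl (fun c i => c ++ [PySem.List.pyGetD p i ""]) []
      = p.take kn := by
  rw [PySem.List.foldl_append_singleton_eq_map, List.nil_append,
      PySem.List.pyRange_zero_natCast, List.map_map]
  apply List.ext_getElem
  · simp [hlen]
  · intro n h1 h2
    simp only [List.getElem_map, List.getElem_range, Function.comp,
      PySem.List.pyGetD_natCast, List.getElem_take]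
    rw [List.getD_eq_getElem]

theorem pv_pathGraph_eq_addE (p : List String) (k : Int) (hk : 1 ≤ k) :
    pvPathGraph p k = pvAddE PySem.Dict.empty p k := by
  unfold pvPathGraph pvAddE
  by_cases hlt : (p.length : Int) < k
  · simp [hlt]
  · simp only [hlt, if_false]
    have hkk : k = (k.toNat : Int) := (Int.toNat_of_nonneg (by omega)).symm
    have hkl : k.toNat ≤ p.length := by omega
    rw [hkk, pv_curr0 p k.toNat hkl]
    have hwin : p.take k.toNat = (p.drop (k.toNat - k.toNat)).take k.toNat := by
      rw [Nat.sub_self, List.drop_zero]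
    rw [hwin]
    rw [pv_loopA p k.toNat (by omega) (p.length - k.toNat) k.toNat (by omega) (le_refl _)
        PySem.Dict.empty]
    simp only [Nat.sub_self]
    rw [Int.toNat_natCast]

theorem pv_zip_nodes (p : List String) (kn : Nat) :
    ∀ (c j : Nat),
      (((List.range' j (c + 1)).map (pvNode p kn)).zip
        ((List.range' j (c + 1)).map (pvNode p kn)).tail) = pvEdges p kn j c := by
  intro c
  induction c with
  | zero => intro j; simp [List.range'_succ, pvEdges]
  | succ c ih =>
    intro j
    rw [List.range'_succ, List.map_cons]
    rw [show List.range' (j+1) (c+1) = (j+1) :: List.range' (j+1+1) c from List.range'_succ]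
    rw [List.map_cons, List.tail_cons, List.zip_cons_cons]
    rw [show pvEdges p kn j (c+1) = (pvNode p kn j, pvNode p kn (j+1)) :: pvEdges p kn (j+1) c
        from rfl]
    congr 1
    have := ih (j + 1)
    rw [List.range'_succ, List.map_cons, List.tail_cons] at this
    exact this

theorem pv_addPath_eq_addE (d : PySem.Dict (String × String) Int) (p : List String) (k : Int)
    (hk : 1 ≤ k) : pvAddPath d p k = pvAddE d p k := by
  unfold pvAddPath pvAddE
  by_cases hlt : (p.length : Int) < k
  · simp [hlt]
  · simp only [hlt, if_false]
    have hkk : k = (k.toNat : Int) := (Int.toNat_of_nonneg (by omega)).symm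
    have hkl : k.toNat ≤ p.length := by omega
    have hm : (p.length : Int) - k + 1 = ((p.length - k.toNat + 1 : Nat) : Int) := by
      push_cast; omega
    have hnodes :
        (PySem.List.pyRange 0 ((p.length : Int) - k + 1) 1).map
          (fun i => PySem.Str.join ";" (PySem.List.slice p (some i) (some (i + k))))
        = (List.range' 0 (p.length - k.toNat + 1)).map (pvNode p k.toNat) := by
      rw [hm, PySem.List.pyRange_zero_natCast, List.map_map, List.range_eq_range']
      apply List.map_congr_left
      intro j _
      simp only [Function.comp]
      rw [hkk, PySem.List.slice_natCast_add p j k.toNat]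
      rfl
    rw [hnodes, pv_zip_nodes p k.toNat (p.length - k.toNat) 0]
    rfl

theorem pv_addK_addK_self (a : PySem.Dict (String × String) Int) (x : String × String) (v w : Int) :
    pvAddK (pvAddK a x v) x w = pvAddK a x (v + w) := by
  unfold pvAddK
  rw [PySem.Dict.getD_insert_self, PySem.Dict.insert_insert_self, add_assoc]

theorem pv_insert_insert_comm (a : PySem.Dict (String × String) Int) (x y : String × String)
    (u v : Int) (hne : y ≠ x) (hx : a.contains x = true) :
    (a.insert x u).insert y v = (a.insert y v).insert x u := by
  have hyx : (y == x) = false := by simp [hne]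
  have hxy : (x == y) = false := by simp [Ne.symm hne]
  have hcx : (a.insert y v).contains x = true := by
    rw [PySem.Dict.contains_insert, hxy, Bool.false_or]; exact hx
  apply PySem.Dict.ext
  cases hy : a.contains y
  · have hcy : (a.insert x u).contains y = false := by
      rw [PySem.Dict.contains_insert, hyx, Bool.false_or]; exact hy
    rw [PySem.Dict.items_insert_of_not_contains (h := hcy),
        PySem.Dict.items_insert_of_contains (h := hx),
        PySem.Dict.items_insert_of_contains (h := hcx),
        PySem.Dict.items_insert_of_not_contains (h := hy),
        List.map_append]
    have hgd : (a.insert y v).getD x 0 = a.getD x 0 := PySem.Dict.getD_insert_of_ne a v 0 (Ne.symm hne)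
    simp [hne]
  · have hcy : (a.insert x u).contains y = true := by
      rw [PySem.Dict.contains_insert, hyx, Bool.false_or]; exact hy
    rw [PySem.Dict.items_insert_of_contains (h := hcy),
        PySem.Dict.items_insert_of_contains (h := hx),
        PySem.Dict.items_insert_of_contains (h := hcx),
        PySem.Dict.items_insert_of_contains (h := hy),
        List.map_map, List.map_map]
    have hgdx : (a.insert y v).getD x 0 = a.getD x 0 := PySem.Dict.getD_insert_of_ne a v 0 (Ne.symm hne)
    have hgdy : (a.insert x u).getD y 0 = a.getD y 0 := PySem.Dict.getD_insert_of_ne a u 0 hne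
    apply List.map_congr_left
    intro q _
    by_cases h1 : q.1 = x <;> by_cases h2 : q.1 = y <;>
      simp_all [Function.comp]

theorem pv_combine_eq_addK_fold (d e : PySem.Dict (String × String) Int) :
    pvCombine d e = d.items.foldl (fun acc kv => pvAddK acc kv.1 kv.2) e := by
  unfold pvCombine
  congr 1
  funext acc kv
  cases h : acc.get? kv.1 <;> simp [pvAddK, PySem.Dict.getD_eq_get?_getD, h]

theorem pv_addK_comm (a : PySem.Dict (String × String) Int) (x y : String × String) (v w : Int)
    (hx : a.contains x = true) :
    pvAddK (pvAddK a x v) y w = pvAddK (pvAddK a y w) x v := by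
  by_cases hxy : y = x
  · subst hxy
    rw [pv_addK_addK_self, pv_addK_addK_self, add_comm]
  · have h1 : (pvAddK a x v).getD y 0 = a.getD y 0 := PySem.Dict.getD_insert_of_ne a _ 0 hxy
    have h2 : (pvAddK a y w).getD x 0 = a.getD x 0 := PySem.Dict.getD_insert_of_ne a _ 0 (Ne.symm hxy)
    show (pvAddK a x v).insert y ((pvAddK a x v).getD y 0 + w)
       = (pvAddK a y w).insert x ((pvAddK a y w).getD x 0 + v)
    rw [h1, h2]
    exact pv_insert_insert_comm a x y _ _ hxy hx

theorem pv_addK_foldl_comm (l : List ((String × String) × Int))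
    (a : PySem.Dict (String × String) Int) (x : String × String) (v : Int)
    (hx : a.contains x = true) :
    l.foldl (fun acc kv => pvAddK acc kv.1 kv.2) (pvAddK a x v)
      = pvAddK (l.foldl (fun acc kv => pvAddK acc kv.1 kv.2) a) x v := by
  induction l generalizing a with
  | nil => rfl
  | cons kv t ih =>
    simp only [List.foldl_cons]
    rw [pv_addK_comm a x kv.1 v kv.2 hx]
    exact ih (pvAddK a kv.1 kv.2) (by
      show (PySem.Dict.insert _ _ _).contains x = true
      rw [PySem.Dict.contains_insert, hx, Bool.or_true])

theorem pv_bump_nodup (d : PySem.Dict (String × String) Int) (x : String × String)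
    (hnd : d.keys.Nodup) : (pvBump d x).keys.Nodup := PySem.Dict.nodup_keys_insert d x _ hnd

theorem pv_combine_bump (d e : PySem.Dict (String × String) Int) (x : String × String)
    (hnd : d.keys.Nodup) : pvCombine (pvBump d x) e = pvBump (pvCombine d e) x := by
  rw [pv_combine_eq_addK_fold, pv_combine_eq_addK_fold]
  have hbump : ∀ (c : PySem.Dict (String × String) Int), pvBump c x = pvAddK c x 1 :=
    fun _ => rfl
  cases hx : d.contains x
  · have hitems : (pvBump d x).items = d.items ++ [(x, d.getD x 0 + 1)] :=
      PySem.Dict.items_insert_of_not_contains d _ hx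
    have hg : d.getD x 0 = 0 := PySem.Dict.getD_of_not_contains d 0 hx
    rw [hitems, List.foldl_append, hg, hbump]
    simp [pvAddK]
  · obtain ⟨v, hv⟩ : ∃ v, d.get? x = some v := by
      have := PySem.Dict.contains_eq_isSome_get? d x
      rw [hx] at this
      exact Option.isSome_iff_exists.mp this.symm
    have hq : (x, v) ∈ d.items := PySem.Dict.mem_items_of_get?_eq_some d hv
    obtain ⟨l1, l2, hdec⟩ := List.append_of_mem hq
    have hnd' : ((l1 ++ (x, v) :: l2).map (·.1)).Nodup := by
      have : d.keys = d.items.map (·.1) := rfl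
      rw [← hdec]; rw [this] at hnd; exact hnd
    have hnd'' : (l1.map (·.1) ++ (x, v).1 :: l2.map (·.1)).Nodup := by
      simpa using hnd'
    have hdisj := List.disjoint_of_nodup_append hnd''
    have hx1 : ∀ q ∈ l1, q.1 ≠ x := by
      intro q hq' hcon
      have hmm : q.1 ∈ l1.map (·.1) := List.mem_map_of_mem hq'
      rw [hcon] at hmm
      exact hdisj hmm (List.mem_cons_self)
    have hgd : d.getD x 0 = v := PySem.Dict.getD_of_mem_items d hq hnd 0
    have hitems : (pvBump d x).items = l1 ++ (x, v + 1) :: l2 := by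
      rw [show (pvBump d x).items
            = d.items.map (fun p => if (p.1 == x) = true then (x, d.getD x 0 + 1) else p) from
          PySem.Dict.items_insert_of_contains d _ hx,
        hdec, List.map_append, List.map_cons]
      congr 1
      · conv_rhs => rw [show l1 = l1.map id from (List.map_id l1).symm]
        apply List.map_congr_left
        intro q hq'
        simp [hx1 q hq']
      · congr 1
        · simp [hgd]
        · conv_rhs => rw [show l2 = l2.map id from (List.map_id l2).symm]
          apply List.map_congr_left
          intro q hq'
          by_cases hc : q.1 = x
          · exfalso
            simp only [List.map_append, List.map_cons, List.nodup_append] at hnd'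
            have := hnd'.2.1
            simp only [List.nodup_cons] at this
            exact this.1 (by rw [← hc]; exact List.mem_map_of_mem hq')
          · simp [hc]
    rw [hitems, hdec, List.foldl_append, List.foldl_append, List.foldl_cons, List.foldl_cons]
    set B0 := l1.foldl (fun acc kv => pvAddK acc kv.1 kv.2) e with hB0
    show l2.foldl _ (pvAddK B0 x (v+1)) = pvBump (l2.foldl _ (pvAddK B0 x v)) x
    have hsplit : pvAddK B0 x (v + 1) = pvAddK (pvAddK B0 x v) x 1 := by
      rw [pv_addK_addK_self]
    rw [hsplit, hbump]
    exact pv_addK_foldl_comm l2 (pvAddK B0 x v) x 1 (PySem.Dict.contains_insert_self B0 x _)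

theorem pv_combine_empty (e : PySem.Dict (String × String) Int) :
    pvCombine PySem.Dict.empty e = e := rfl

theorem pv_combine_bumpfold (l : List (String × String)) :
    ∀ (d e : PySem.Dict (String × String) Int), d.keys.Nodup →
      pvCombine (l.foldl pvBump d) e = l.foldl pvBump (pvCombine d e) := by
  induction l with
  | nil => intro d e _; rfl
  | cons x t ih =>
    intro d e hnd
    simp only [List.foldl_cons]
    rw [ih (pvBump d x) e (pv_bump_nodup d x hnd), pv_combine_bump d e x hnd]

theorem pv_addE_nodup (d : PySem.Dict (String × String) Int) (p : List String) (k : Int)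
    (hnd : d.keys.Nodup) : (pvAddE d p k).keys.Nodup := by
  unfold pvAddE
  split
  · exact hnd
  · exact PySem.Dict.nodup_keys_foldl_insert _ (fun d x => d.getD x 0 + 1) d hnd

theorem pv_foldr_nodup (s : List (List String)) (k : Int)
    (e : PySem.Dict (String × String) Int) (he : e.keys.Nodup) :
    (pvFoldr s k e).keys.Nodup := by
  induction s with
  | nil => exact he
  | cons p t ih => exact pv_addE_nodup _ p k ih

theorem pv_combine_foldr (s : List (List String)) (k : Int)
    (e : PySem.Dict (String × String) Int) :
    pvCombine (pvFoldr s k PySem.Dict.empty) e = pvFoldr s k e := by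
  induction s with
  | nil => exact pv_combine_empty e
  | cons p t ih =>
    show pvCombine (pvAddE (pvFoldr t k PySem.Dict.empty) p k) e
       = pvAddE (pvFoldr t k e) p k
    unfold pvAddE
    split
    · exact ih
    · rw [pv_combine_bumpfold _ _ _
        (pv_foldr_nodup t k PySem.Dict.empty PySem.Dict.nodup_keys_empty), ih]

theorem pv_foldr_append (s1 s2 : List (List String)) (k : Int)
    (e : PySem.Dict (String × String) Int) :
    pvFoldr (s1 ++ s2) k e = pvFoldr s1 k (pvFoldr s2 k e) := by
  unfold pvFoldr
  exact List.foldr_append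

theorem pv_dbg_eq_foldr (k : Int) (hk : 1 ≤ k) :
    ∀ (n : Nat) (s : List (List String)), s.length = n → s ≠ [] →
      pvDBG s k = pvFoldr s k PySem.Dict.empty := by
  intro n
  induction n using Nat.strong_induction_on with
  | _ n ih =>
    intro s hlen hne
    subst hlen
    rw [pvDBG]
    by_cases h1 : s.length = 1
    · obtain ⟨p, rfl⟩ := List.length_eq_one_iff.mp h1
      simp only [h1]
      rw [show PySem.List.pyGetD [p] (0:Int) [] = p from rfl]
      exact pv_pathGraph_eq_addE p k hk
    · have h0 : ¬ s.length = 0 := by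
        intro h; exact hne (List.length_eq_zero_iff.mp h)
      simp only [h1, h0, dite_false]
      have hmid : PySem.Int.floordiv (s.length : Int) 2 = ((s.length / 2 : Nat) : Int) :=
        PySem.Int.floordiv_natCast s.length 2
      have hsl1 : PySem.List.slice s (some 0) (some (PySem.Int.floordiv (s.length : Int) 2))
          = s.take (s.length / 2) := by
        rw [hmid, show ((0:Int) = ((0:Nat):Int)) from rfl, PySem.List.slice_natCast,
          List.drop_zero, Nat.sub_zero]
      have hsl2 : PySem.List.slice s (some (PySem.Int.floordiv (s.length : Int) 2))
            (some (s.length : Int)) = s.drop (s.length / 2) := by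
        rw [hmid, PySem.List.slice_natCast]
        exact List.take_of_length_le (by simp [List.length_drop])
      rw [hsl1, hsl2]
      have hlb : 2 ≤ s.length := by
        cases hnat : s.length with
        | zero => exact absurd hnat h0
        | succ m => cases m with
          | zero => exact absurd hnat h1
          | succ m' => omega
      have htake := ih (s.take (s.length / 2)).length
        (by simp only [List.length_take]; omega)
        (s.take (s.length / 2)) rfl
        (by intro hcon
            have hc := congrArg List.length hcon
            simp only [List.length_take, List.length_nil] at hc
            omega)
      have hdrop := ih (s.drop (s.length / 2)).length
        (by simp only [List.length_drop]; omega)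
        (s.drop (s.length / 2)) rfl
        (by intro hcon
            have hc := congrArg List.length hcon
            simp only [List.length_drop, List.length_nil] at hc
            omega)
      rw [htake, hdrop, pv_combine_foldr, ← pv_foldr_append, List.take_append_drop]

-- ===== VERDICT (by name: the statement is the Claim_ definition above) =====
theorem constructDBGraph_spec : Claim_equal_constructDBGraph := by
  intro s k _hdom hpre
  unfold Spec_constructDBGraph constructDBGraph constructDBGraph_alt
  obtain ⟨hs, hk⟩ := hpre
  rw [pv_dbg_eq_foldr k hk s.length s rfl hs]
  have hfold : ∀ (t : List (List String)),
      t.foldr (fun p acc => pvAddPath acc p k) PySem.Dict.empty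
        = t.foldr (fun p acc => pvAddE acc p k) PySem.Dict.empty := by
    intro t
    induction t with
    | nil => rfl
    | cons p t ih =>
      simp only [List.foldr_cons]
      rw [ih, pv_addPath_eq_addE _ _ _ hk]
  rw [List.foldl_reverse, hfold]
  rfl
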